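-- pv_equiv track=rewrite | github.com/khamiruf/CZ3004_MDP | RPI/src/communicator/utils.py | compressStepSeq
-- ===== SOURCE A (Python) =====
-- def compressStepSeq(step_seq):
--     forward_count = 0
--     seq = []
--     for step in step_seq:
--         if step == 'F':
--             forward_count = forward_count + 1
--             if forward_count == 9:
--                 seq.append('F{x}'.format(x=forward_count))
--                 forward_count = 0
--         else:
--             seq.append('F{x}'.format(x=forward_count))
--             seq.append(step)
--             forward_count = 0
--     if forward_count > 0:
--         seq.append('F{x}'.format(x=forward_count))
--     return seq
-- ===== SOURCE B (Python) =====
-- def compressStepSeq(step_seq):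
--     steps = list(step_seq)
--     out = []
--     remainder = 0
--     i = 0
--     n = len(steps)
--     while i < n:
--         is_f = steps[i] == 'F'
--         j = i
--         while j < n and (steps[j] == 'F') == is_f:
--             j += 1
--         if is_f:
--             k = j - i
--             out.extend(['F9'] * (k // 9))
--             remainder = k % 9
--         else:
--             for s in steps[i:j]:
--                 out.append('F%d' % remainder)
--                 out.append(s)
--                 remainder = 0
--         i = j
--     if remainder > 0:
--         out.append('F%d' % remainder)
--     return out
-- ===== Notes on version B (the rewrite author's own statement) =====
-- stated objective: alternative
-- what changed: Replaces the per-step forward counter with run-length grouping: maximal runs are found by scanning, an F-run of length k emits 'F9' k//9 times with remainder k%9 computed by divmod, and non-F runs flush the remainder element-wise.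
import Mathlib
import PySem

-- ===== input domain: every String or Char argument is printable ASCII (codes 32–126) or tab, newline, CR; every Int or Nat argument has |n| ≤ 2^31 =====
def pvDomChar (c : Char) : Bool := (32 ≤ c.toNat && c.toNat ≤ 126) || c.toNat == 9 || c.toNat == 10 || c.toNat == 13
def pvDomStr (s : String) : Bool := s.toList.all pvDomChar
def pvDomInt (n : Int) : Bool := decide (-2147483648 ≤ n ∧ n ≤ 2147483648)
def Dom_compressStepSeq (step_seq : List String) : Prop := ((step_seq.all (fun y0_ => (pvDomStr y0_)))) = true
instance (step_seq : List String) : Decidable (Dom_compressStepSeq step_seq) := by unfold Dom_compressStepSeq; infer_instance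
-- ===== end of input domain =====

-- B replaces A's per-step forward counter with run-length grouping (div/mod per F-run); alternative decomposition, same values.
-- ===== PORT A =====
-- A's loop body: state = (forward_count, seq)
def pvAStep (st : Int × List String) (step : String) : Int × List String :=
  if step == "F" then
    let fc := st.1 + 1
    if fc == (9 : Int) then ((0 : Int), st.2 ++ ["F" ++ PySem.Int.toStr fc]) else (fc, st.2)
  else ((0 : Int), st.2 ++ ["F" ++ PySem.Int.toStr st.1, step])

def compressStepSeq (step_seq : List String) : List String :=
  let st := step_seq.foldl pvAStep ((0 : Int), ([] : List String))
  if st.1 > 0 then st.2 ++ ["F" ++ PySem.Int.toStr st.1] else st.2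

-- ===== PORT B =====
-- maximal runs of equal "is-F" status, as in Source B's inner scan (i..j)
def pvRuns : List String → List (Bool × List String)
  | [] => []
  | x :: xs =>
    let k := x == "F"
    (k, x :: xs.takeWhile (fun y => (y == "F") == k)) ::
      pvRuns (xs.dropWhile (fun y => (y == "F") == k))
termination_by xs => xs.length
decreasing_by
  simp only [List.length_cons]
  exact Nat.lt_succ_of_le (List.length_dropWhile_le _ _)

-- the non-F branch of Source B's outer loop: flush remainder before each element
def pvEmitNonF : List String → Nat → List String
  | [], _ => []
  | s :: ss, r => ("F" ++ PySem.Int.toStr r) :: s :: pvEmitNonF ss 0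

-- Source B's outer loop over runs + final flush (divmod on len(group) ≥ 0 is Nat / and %)
def pvProcess : List (Bool × List String) → Nat → List String
  | [], r => if r > 0 then ["F" ++ PySem.Int.toStr r] else []
  | (true, g) :: rest, _ => List.replicate (g.length / 9) "F9" ++ pvProcess rest (g.length % 9)
  | (false, g) :: rest, r => pvEmitNonF g r ++ pvProcess rest 0

def compressStepSeq_alt (step_seq : List String) : List String :=
  pvProcess (pvRuns step_seq) 0

-- ===== PRECONDITION & SPEC =====
def Spec_compressStepSeq (step_seq : List String) (out : List String) : Prop := out = compressStepSeq_alt step_seq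
instance (step_seq : List String) (out : List String) : Decidable (Spec_compressStepSeq step_seq out) := by unfold Spec_compressStepSeq; infer_instance

-- ===== CLAIM (what is proved, stated in full; the proofs are below) =====
def Claim_equal_compressStepSeq : Prop := ∀ (step_seq : List String), Dom_compressStepSeq step_seq → Spec_compressStepSeq step_seq (compressStepSeq step_seq)

-- ===== LEMMAS AND PROOFS =====

-- recursive rephrasing of A's fold (state = pending forward count)
def pvGo : List String → Int → List String
  | [], c => if c > 0 then ["F" ++ PySem.Int.toStr c] else []
  | s :: rest, c =>
    if s == "F" then
      (if c + 1 == (9 : Int) then "F9" :: pvGo rest 0 else pvGo rest (c + 1))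
    else ("F" ++ PySem.Int.toStr c) :: s :: pvGo rest 0

lemma pvFoldA (xs : List String) : ∀ (c : Int) (acc : List String),
    (let st := xs.foldl pvAStep (c, acc)
     if st.1 > 0 then st.2 ++ ["F" ++ PySem.Int.toStr st.1] else st.2) = acc ++ pvGo xs c := by
  induction xs with
  | nil =>
    intro c acc
    simp only [List.foldl_nil, pvGo]
    split <;> simp
  | cons x xs ih =>
    intro c acc
    rw [List.foldl_cons]
    by_cases hx : x == "F"
    · by_cases h9 : c + 1 == (9 : Int)
      · have hst : pvAStep (c, acc) x = ((0 : Int), acc ++ ["F" ++ PySem.Int.toStr (c + 1)]) := by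
          simp [pvAStep, hx, h9]
        rw [hst, ih]
        have h9' : c + 1 = 9 := eq_of_beq h9
        have hF9 : "F" ++ PySem.Int.toStr (c + 1) = "F9" := by rw [h9']; decide
        rw [pvGo, if_pos hx, if_pos h9, hF9]
        simp
      · have hst : pvAStep (c, acc) x = (c + 1, acc) := by
          simp [pvAStep, hx, h9]
        rw [hst, ih, pvGo, if_pos hx, if_neg h9]
    · have hst : pvAStep (c, acc) x = ((0 : Int), acc ++ ["F" ++ PySem.Int.toStr c, x]) := by
        simp [pvAStep, hx]
      rw [hst, ih, pvGo, if_neg hx]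
      simp

lemma pvGoF (k : Nat) : ∀ (c : Nat) (rest : List String), c < 9 →
    pvGo (List.replicate k "F" ++ rest) (c : Int) =
      List.replicate ((c + k) / 9) "F9" ++ pvGo rest (((c + k) % 9 : Nat) : Int) := by
  induction k with
  | zero =>
    intro c rest hc
    simp [Nat.div_eq_of_lt hc, Nat.mod_eq_of_lt hc]
  | succ k ih =>
    intro c rest hc
    rw [List.replicate_succ, List.cons_append, pvGo, if_pos (by decide : ("F" == "F") = true)]
    by_cases h9 : (c : Int) + 1 == (9 : Int)
    · have hc8 : c = 8 := by have := eq_of_beq h9; omega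
      subst hc8
      rw [if_pos h9]
      have h0 := ih 0 rest (by omega)
      simp only [Nat.cast_zero, Nat.zero_add] at h0
      rw [h0]
      have hdiv : (8 + (k + 1)) / 9 = k / 9 + 1 := by omega
      have hmod : (8 + (k + 1)) % 9 = k % 9 := by omega
      rw [hdiv, hmod, List.replicate_succ]
      simp
    · have hlt : c + 1 < 9 := by
        rcases Nat.lt_or_ge (c + 1) 9 with h | h
        · exact h
        · exfalso; apply h9
          have : c = 8 := by omega
          subst this; decide
      rw [if_neg h9]
      rw [show ((c : Int) + 1) = (((c + 1 : Nat)) : Int) by push_cast; ring]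
      rw [ih (c + 1) rest hlt]
      have h1 : c + 1 + k = c + (k + 1) := by omega
      rw [h1]

lemma pvHeadDropWhile (p : String → Bool) (xs : List String) (z : String)
    (h : (xs.dropWhile p).head? = some z) : p z = false := by
  induction xs with
  | nil => simp [List.dropWhile] at h
  | cons a t ih =>
    rw [List.dropWhile_cons] at h
    split at h
    · exact ih h
    · rename_i hp
      simp only [List.head?_cons, Option.some.injEq] at h
      subst h
      simpa using hp

lemma pvEmit (rest : List String)
    (h : pvProcess (pvRuns rest) 0 = pvGo rest 0) :
    ∀ (g : List String), (∀ y ∈ g, (y == "F") = false) →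
    pvEmitNonF g 0 ++ pvProcess (pvRuns rest) 0 = pvGo (g ++ rest) 0 := by
  intro g
  induction g with
  | nil => intro _; simpa using h
  | cons y g ihg =>
    intro hg
    have hy : (y == "F") = false := hg y (by simp)
    have hgo : pvGo ((y :: g) ++ rest) 0 = ("F" ++ PySem.Int.toStr 0) :: y :: pvGo (g ++ rest) 0 := by
      rw [List.cons_append, pvGo, if_neg (by simp [hy])]
    rw [hgo, pvEmitNonF, ← ihg (fun z hz => hg z (by simp [hz]))]
    simp

lemma pvMain (n : Nat) : ∀ (xs : List String), xs.length ≤ n → ∀ (c : Nat),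
    (∀ x, xs.head? = some x → x = "F" → c = 0) →
    pvProcess (pvRuns xs) c = pvGo xs (c : Int) := by
  induction n with
  | zero =>
    intro xs hlen c _
    have hnil : xs = [] := List.eq_nil_of_length_eq_zero (Nat.le_zero.mp hlen)
    subst hnil
    rw [pvRuns, pvProcess, pvGo]
    by_cases hc : 0 < c
    · rw [if_pos hc, if_pos (by exact_mod_cast hc)]
    · rw [if_neg hc, if_neg (by exact_mod_cast hc)]
  | succ n ih =>
    intro xs hlen c hc
    cases xs with
    | nil =>
      rw [pvRuns, pvProcess, pvGo]
      by_cases hcp : 0 < c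
      · rw [if_pos hcp, if_pos (by exact_mod_cast hcp)]
      · rw [if_neg hcp, if_neg (by exact_mod_cast hcp)]
    | cons x xs =>
      rw [pvRuns]
      by_cases hx : x == "F"
      · have hx' : x = "F" := eq_of_beq hx
        have hc0 : c = 0 := hc x rfl hx'
        subst hc0
        simp only [hx]
        set tw := xs.takeWhile (fun y => (y == "F") == true) with htw
        set dw := xs.dropWhile (fun y => (y == "F") == true) with hdw
        rw [pvProcess]
        have htwF : ∀ y ∈ tw, y = "F" := by
          intro y hy
          have := List.mem_takeWhile_imp hy
          simpa using this
        have hrep : x :: tw = List.replicate (x :: tw).length "F" := by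
          apply List.eq_replicate_of_mem
          intro y hy
          rcases List.mem_cons.mp hy with h | h
          · rw [h, hx']
          · exact htwF y h
        have hxs : xs = tw ++ dw := (List.takeWhile_append_dropWhile ..).symm
        have hlen2 : dw.length ≤ n := by
          have h1 := List.length_dropWhile_le (fun y => (y == "F") == true) xs
          rw [← hdw] at h1
          simp only [List.length_cons] at hlen
          omega
        have hdwhead : ∀ z, dw.head? = some z → z = "F" → (x :: tw).length % 9 = 0 := by
          intro z hz hzF
          exfalso
          have := pvHeadDropWhile (fun y => (y == "F") == true) xs z (hdw ▸ hz)
          simp [hzF] at this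
        have hrec := ih dw hlen2 ((x :: tw).length % 9) hdwhead
        rw [hrec]
        have hlhs : pvGo (x :: xs) ((0 : Nat) : Int) =
            pvGo (List.replicate (x :: tw).length "F" ++ dw) ((0 : Nat) : Int) := by
          rw [← hrep, hxs]; simp
        rw [Nat.cast_zero] at hlhs ⊢
        rw [hlhs]
        have hgf := pvGoF (x :: tw).length 0 dw (by omega)
        simp only [Nat.cast_zero, Nat.zero_add] at hgf
        rw [hgf]
      · simp only [hx]
        set tw := xs.takeWhile (fun y => (y == "F") == false) with htw
        set dw := xs.dropWhile (fun y => (y == "F") == false) with hdw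
        rw [pvProcess]
        have hxs : xs = tw ++ dw := (List.takeWhile_append_dropWhile ..).symm
        have hlen2 : dw.length ≤ n := by
          have h1 := List.length_dropWhile_le (fun y => (y == "F") == false) xs
          rw [← hdw] at h1
          simp only [List.length_cons] at hlen
          omega
        have hrec := ih dw hlen2 0 (by intro _ _ _; rfl)
        rw [Nat.cast_zero] at hrec
        have htwF : ∀ y ∈ tw, (y == "F") = false := by
          intro y hy
          have := List.mem_takeWhile_imp hy
          simpa using this
        rw [pvEmitNonF]
        have hone : pvGo (x :: xs) (c : Int) =
            ("F" ++ PySem.Int.toStr (c : Int)) :: x :: pvGo xs 0 := by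
          rw [pvGo, if_neg (by simp [hx])]
        rw [hone, hxs]
        rw [← pvEmit dw hrec tw htwF]
        simp

-- ===== VERDICT (by name: the statement is the Claim_ definition above) =====
theorem compressStepSeq_spec : Claim_equal_compressStepSeq := by
  intro xs _
  unfold Spec_compressStepSeq compressStepSeq compressStepSeq_alt
  rw [pvFoldA xs 0 []]
  have h := pvMain xs.length xs le_rfl 0 (by intro _ _ _; rfl)
  rw [Nat.cast_zero] at h
  rw [h]
  simp
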